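-- pv_equiv track=rewrite | github.com/darionguan/budget-app | budget.py | show_descriptions
-- ===== SOURCE A (Python) =====
-- def show_descriptions(my_print, descriptions):
--     # find the description with the longest length
--     max_description = 0
--     for description in descriptions:
--         if len(description) > max_description:
--             max_description = len(description)
--
--     # iterate through each letter and word index
--     # use try and except IndexError as the program will go over the maximum index for certain words
--     # spacing is also dependent on if it is the first word, a word in the middle or the last word
--     for letter in range(0, max_description):
--         for word in range(0, len(descriptions)):
--             if word == 0 and word < len(descriptions):
--                 my_print += '     '
--                 try:
--                     my_print += descriptions[word][letter]
--                 except IndexError: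
--                     my_print += ' '
--             elif 0 < word < len(descriptions) - 1:
--                 my_print += '  '
--                 try:
--                     my_print += descriptions[word][letter]
--                 except IndexError:
--                     my_print += ' '
--             else:
--                 my_print += '  '
--                 try:
--                     my_print += descriptions[word][letter] + '  '
--                 except IndexError:
--                     my_print += ' '
--         if letter < max_description - 1:
--             my_print += '\n'
--     return my_print
-- ===== SOURCE B (Python) =====
-- def show_descriptions(my_print, descriptions):
--     # Transposed loop order: one pass over the words; each word emits its column
--     # of cells, appended into per-row accumulators; rows joined with newlines.
--     n = len(descriptions)
--     width = max(map(len, descriptions), default=0)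
--     rows = [[] for _ in range(width)]
--     for j, d in enumerate(descriptions):
--         pre = '     ' if j == 0 else '  '
--         if 0 < j == n - 1:
--             cells = [pre + (d[i] + '  ' if i < len(d) else ' ') for i in range(width)]
--         else:
--             cells = [pre + c for c in d.ljust(width)]
--         for r, c in zip(rows, cells):
--             r.append(c)
--     return my_print + '\n'.join(''.join(r) for r in rows)
-- ===== Notes on version B (the rewrite author's own statement) =====
-- stated objective: alternative
-- what changed: B transposes the loop nesting: instead of A's letter-outer/word-inner character-by-character string growth with try/except around each index, B makes one pass over the words, each word emitting its whole padded column of cells which is appended into per-row accumulators, and joins the rows with newlines.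
import Mathlib
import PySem

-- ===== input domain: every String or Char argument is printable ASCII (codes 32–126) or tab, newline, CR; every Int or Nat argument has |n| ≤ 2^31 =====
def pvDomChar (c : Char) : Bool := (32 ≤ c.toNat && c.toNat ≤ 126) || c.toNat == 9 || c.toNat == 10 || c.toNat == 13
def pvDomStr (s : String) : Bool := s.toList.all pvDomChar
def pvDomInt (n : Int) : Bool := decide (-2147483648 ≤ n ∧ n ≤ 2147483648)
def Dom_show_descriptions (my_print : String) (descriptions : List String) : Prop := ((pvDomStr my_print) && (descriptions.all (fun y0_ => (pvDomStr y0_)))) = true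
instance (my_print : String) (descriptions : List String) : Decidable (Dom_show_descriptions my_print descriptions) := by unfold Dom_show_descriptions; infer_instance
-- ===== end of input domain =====

-- B transposes the loop nesting: one pass over the words, each word emitting its whole padded
-- column of cells, appended into per-row accumulators, rows joined with '\n' — instead of A's
-- letter-outer/word-inner character-by-character growth with try/except.

-- ===== PORT A =====
def show_descriptions (my_print : String) (descriptions : List String) : String :=
  let ds := descriptions.map String.toList
  let maxDesc := ds.foldl (fun m d => if PySem.List.len d > m then PySem.List.len d else m) 0
  let out := (PySem.List.pyRange 0 maxDesc).foldl (fun acc letter =>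
    let acc := (PySem.List.pyRange 0 (PySem.List.len ds)).foldl (fun acc word =>
      if word = 0 ∧ word < PySem.List.len ds then
        match PySem.List.pyGet? (PySem.List.pyGetD ds word []) letter with
        | some c => (acc ++ "     ".toList) ++ [c]
        | none => (acc ++ "     ".toList) ++ [' ']
      else if 0 < word ∧ word < PySem.List.len ds - 1 then
        match PySem.List.pyGet? (PySem.List.pyGetD ds word []) letter with
        | some c => (acc ++ "  ".toList) ++ [c]
        | none => (acc ++ "  ".toList) ++ [' ']
      else
        match PySem.List.pyGet? (PySem.List.pyGetD ds word []) letter with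
        | some c => (acc ++ "  ".toList) ++ ([c] ++ "  ".toList)
        | none => (acc ++ "  ".toList) ++ [' ']) acc
    if letter < maxDesc - 1 then acc ++ ['\n'] else acc) my_print.toList
  String.ofList out

-- ===== PORT B =====
def show_descriptions_alt (my_print : String) (descriptions : List String) : String :=
  let ds := descriptions.map String.toList
  let n := PySem.List.len ds
  let width := PySem.List.maxD (ds.map PySem.List.len) (fun x => x) 0
  let rows := (PySem.List.enumerate ds).foldl (fun rows jd =>
    let pre := if jd.1 = 0 then "     ".toList else "  ".toList
    let cells := if 0 < jd.1 ∧ jd.1 = n - 1 then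
        (PySem.List.pyRange 0 width).map (fun i =>
          pre ++ (if i < PySem.List.len jd.2 then [PySem.List.pyGetD jd.2 i ' '] ++ "  ".toList else [' ']))
      else
        (jd.2 ++ List.replicate (width - PySem.List.len jd.2).toNat ' ').map (fun c => pre ++ [c])
    List.zipWith (fun r c => r ++ [c]) rows cells)
    (List.replicate width.toNat ([] : List (List Char)))
  String.ofList (my_print.toList ++ PySem.Chars.join ['\n'] (rows.map List.flatten))

-- ===== PRECONDITION & SPEC =====
def Spec_show_descriptions (my_print : String) (descriptions : List String) (out : String) : Prop := out = show_descriptions_alt my_print descriptions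
instance (my_print : String) (descriptions : List String) (out : String) : Decidable (Spec_show_descriptions my_print descriptions out) := by unfold Spec_show_descriptions; infer_instance

-- ===== CLAIM (what is proved, stated in full; the proofs are below) =====
def Claim_equal_show_descriptions : Prop := ∀ (my_print : String) (descriptions : List String), Dom_show_descriptions my_print descriptions → Spec_show_descriptions my_print descriptions (show_descriptions my_print descriptions)

-- ===== LEMMAS AND PROOFS =====

-- A's running maximum of the description lengths
def pvMaxA (ds : List (List Char)) : Int :=
  ds.foldl (fun m d => if PySem.List.len d > m then PySem.List.len d else m) 0

-- the same maximum as a natural number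
def pvW (ds : List (List Char)) : Nat := (ds.map List.length).foldl max 0

-- A's contribution of one word to one output row
def pvPieceA (ds : List (List Char)) (letter word : Int) : List Char :=
  if word = 0 ∧ word < PySem.List.len ds then
    "     ".toList ++ (match PySem.List.pyGet? (PySem.List.pyGetD ds word []) letter with
      | some c => [c] | none => [' '])
  else if 0 < word ∧ word < PySem.List.len ds - 1 then
    "  ".toList ++ (match PySem.List.pyGet? (PySem.List.pyGetD ds word []) letter with
      | some c => [c] | none => [' '])
  else
    "  ".toList ++ (match PySem.List.pyGet? (PySem.List.pyGetD ds word []) letter with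
      | some c => [c] ++ "  ".toList | none => [' '])

def pvRowA (ds : List (List Char)) (letter : Int) : List Char :=
  (PySem.List.pyRange 0 (PySem.List.len ds)).flatMap (pvPieceA ds letter)

-- B's cell of word jd in row i
def pvCellAt (ds : List (List Char)) (jd : Int × List Char) (i : Nat) : List Char :=
  (if jd.1 = 0 then "     ".toList else "  ".toList) ++
  (if 0 < jd.1 ∧ jd.1 = PySem.List.len ds - 1 then
    (if (i : Int) < PySem.List.len jd.2 then [PySem.List.pyGetD jd.2 (i : Int) ' '] ++ "  ".toList else [' '])
  else
    [(jd.2 ++ List.replicate (pvW ds - jd.2.length) ' ').getD i ' '])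

lemma pvA_inner (ds : List (List Char)) (letter : Int) (acc : List Char) :
    (PySem.List.pyRange 0 (PySem.List.len ds)).foldl (fun acc word =>
      if word = 0 ∧ word < PySem.List.len ds then
        match PySem.List.pyGet? (PySem.List.pyGetD ds word []) letter with
        | some c => (acc ++ "     ".toList) ++ [c]
        | none => (acc ++ "     ".toList) ++ [' ']
      else if 0 < word ∧ word < PySem.List.len ds - 1 then
        match PySem.List.pyGet? (PySem.List.pyGetD ds word []) letter with
        | some c => (acc ++ "  ".toList) ++ [c]
        | none => (acc ++ "  ".toList) ++ [' ']
      else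
        match PySem.List.pyGet? (PySem.List.pyGetD ds word []) letter with
        | some c => (acc ++ "  ".toList) ++ ([c] ++ "  ".toList)
        | none => (acc ++ "  ".toList) ++ [' ']) acc
    = acc ++ pvRowA ds letter := by
  have h : ∀ (a : List Char), ∀ w ∈ PySem.List.pyRange 0 (PySem.List.len ds),
      (if w = 0 ∧ w < PySem.List.len ds then
        match PySem.List.pyGet? (PySem.List.pyGetD ds w []) letter with
        | some c => (a ++ "     ".toList) ++ [c]
        | none => (a ++ "     ".toList) ++ [' ']
      else if 0 < w ∧ w < PySem.List.len ds - 1 then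
        match PySem.List.pyGet? (PySem.List.pyGetD ds w []) letter with
        | some c => (a ++ "  ".toList) ++ [c]
        | none => (a ++ "  ".toList) ++ [' ']
      else
        match PySem.List.pyGet? (PySem.List.pyGetD ds w []) letter with
        | some c => (a ++ "  ".toList) ++ ([c] ++ "  ".toList)
        | none => (a ++ "  ".toList) ++ [' ']) = a ++ pvPieceA ds letter w := by
    intro a w _
    unfold pvPieceA
    cases hm : PySem.List.pyGet? (PySem.List.pyGetD ds w []) letter with
    | none => split_ifs <;> simp [List.append_assoc]
    | some c => split_ifs <;> simp [List.append_assoc]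
  rw [PySem.List.foldl_congr_mem _ _ _ _ h, PySem.List.foldl_append_eq_flatMap]
  rfl

lemma pvA_eq (mp : String) (descriptions : List String) :
    show_descriptions mp descriptions =
      String.ofList (mp.toList ++ (PySem.List.pyRange 0 (pvMaxA (descriptions.map String.toList))).flatMap
        (fun letter => pvRowA (descriptions.map String.toList) letter ++
          (if letter < pvMaxA (descriptions.map String.toList) - 1 then ['\n'] else []))) := by
  unfold show_descriptions pvMaxA
  dsimp only []
  refine congrArg String.ofList ?_
  have h : ∀ (acc : List Char), ∀ letter ∈ PySem.List.pyRange 0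
      ((descriptions.map String.toList).foldl (fun m d => if PySem.List.len d > m then PySem.List.len d else m) 0),
      (if letter < (descriptions.map String.toList).foldl (fun m d => if PySem.List.len d > m then PySem.List.len d else m) 0 - 1 then
        ((PySem.List.pyRange 0 (PySem.List.len (descriptions.map String.toList))).foldl (fun acc word =>
          if word = 0 ∧ word < PySem.List.len (descriptions.map String.toList) then
            match PySem.List.pyGet? (PySem.List.pyGetD (descriptions.map String.toList) word []) letter with
            | some c => (acc ++ "     ".toList) ++ [c]
            | none => (acc ++ "     ".toList) ++ [' ']
          else if 0 < word ∧ word < PySem.List.len (descriptions.map String.toList) - 1 then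
            match PySem.List.pyGet? (PySem.List.pyGetD (descriptions.map String.toList) word []) letter with
            | some c => (acc ++ "  ".toList) ++ [c]
            | none => (acc ++ "  ".toList) ++ [' ']
          else
            match PySem.List.pyGet? (PySem.List.pyGetD (descriptions.map String.toList) word []) letter with
            | some c => (acc ++ "  ".toList) ++ ([c] ++ "  ".toList)
            | none => (acc ++ "  ".toList) ++ [' ']) acc) ++ ['\n']
      else
        ((PySem.List.pyRange 0 (PySem.List.len (descriptions.map String.toList))).foldl (fun acc word =>
          if word = 0 ∧ word < PySem.List.len (descriptions.map String.toList) then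
            match PySem.List.pyGet? (PySem.List.pyGetD (descriptions.map String.toList) word []) letter with
            | some c => (acc ++ "     ".toList) ++ [c]
            | none => (acc ++ "     ".toList) ++ [' ']
          else if 0 < word ∧ word < PySem.List.len (descriptions.map String.toList) - 1 then
            match PySem.List.pyGet? (PySem.List.pyGetD (descriptions.map String.toList) word []) letter with
            | some c => (acc ++ "  ".toList) ++ [c]
            | none => (acc ++ "  ".toList) ++ [' ']
          else
            match PySem.List.pyGet? (PySem.List.pyGetD (descriptions.map String.toList) word []) letter with
            | some c => (acc ++ "  ".toList) ++ ([c] ++ "  ".toList)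
            | none => (acc ++ "  ".toList) ++ [' ']) acc))
      = acc ++ (pvRowA (descriptions.map String.toList) letter ++
          (if letter < (descriptions.map String.toList).foldl (fun m d => if PySem.List.len d > m then PySem.List.len d else m) 0 - 1 then ['\n'] else [])) := by
    intro acc letter _
    rw [pvA_inner]
    split_ifs <;> simp [List.append_assoc]
  rw [PySem.List.foldl_congr_mem _ _ _ _ h, PySem.List.foldl_append_eq_flatMap]

lemma pvFoldMaxCast (t : List (List Char)) (a : Nat) :
    t.foldl (fun m d => if PySem.List.len d > m then PySem.List.len d else m) (a : Int)
      = (((t.map List.length).foldl max a : Nat) : Int) := by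
  induction t generalizing a with
  | nil => simp
  | cons d t ih =>
    simp only [List.foldl_cons, List.map_cons]
    rw [show (if PySem.List.len d > (a : Int) then PySem.List.len d else (a : Int)) = (((max a d.length : Nat)) : Int) by
      simp only [PySem.List.len_eq]; split_ifs <;> push_cast <;> omega]
    exact ih _

lemma pvMaxA_eq_W (ds : List (List Char)) : pvMaxA ds = (pvW ds : Int) := by
  unfold pvMaxA pvW
  exact_mod_cast pvFoldMaxCast ds 0

lemma pvCastFoldMax (t : List (List Char)) (a : Nat) :
    (t.map PySem.List.len).foldl max (a : Int) = (((t.map List.length).foldl max a : Nat) : Int) := by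
  induction t generalizing a with
  | nil => simp
  | cons d t ih =>
    simp only [List.map_cons, List.foldl_cons, PySem.List.len_eq]
    rw [show max (a : Int) (d.length : Int) = ((max a d.length : Nat) : Int) by push_cast; omega]
    exact ih _

lemma pvMaxD_eq_W (ds : List (List Char)) :
    PySem.List.maxD (ds.map PySem.List.len) (fun x => x) 0 = (pvW ds : Int) := by
  cases ds with
  | nil =>
    have h0 : PySem.List.max? ([] : List Int) (fun x => x) = none :=
      (PySem.List.max?_eq_none_iff _ _).mpr rfl
    simp [PySem.List.maxD, pvW, h0]
  | cons d t =>
    unfold PySem.List.maxD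
    rw [List.map_cons, PySem.List.max?_id_cons]
    simp only [Option.getD_some]
    rw [show PySem.List.len d = ((d.length : Nat) : Int) from PySem.List.len_eq d, pvCastFoldMax]
    unfold pvW
    simp

lemma pvLen_le_W (ds : List (List Char)) {d : List Char} (hd : d ∈ ds) : d.length ≤ pvW ds :=
  (PySem.List.le_foldl_max (ds.map List.length) 0).2 _ (List.mem_map_of_mem hd)

lemma pvJoinSnoc (l : List (List Char)) (x : List Char) :
    PySem.Chars.join ['\n'] (l ++ [x]) = l.flatMap (fun y => y ++ ['\n']) ++ x := by
  induction l with
  | nil => simp [PySem.Chars.join_singleton]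
  | cons y t ih =>
    cases t with
    | nil =>
      rw [List.cons_append, List.nil_append, PySem.Chars.join_cons_cons,
        PySem.Chars.join_singleton]
      simp [List.append_assoc]
    | cons z t' =>
      rw [List.cons_append, List.cons_append, PySem.Chars.join_cons_cons, ← List.cons_append, ih]
      simp [List.append_assoc]

lemma pvJoin_eq (w : Nat) (f : Nat → List Char) :
    (List.range w).flatMap (fun i => f i ++ (if (i : Int) < (w : Int) - 1 then ['\n'] else [])) =
      PySem.Chars.join ['\n'] ((List.range w).map f) := by
  cases w with
  | zero => simp [PySem.Chars.join_nil]
  | succ w =>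
    have h1 : (List.range w).flatMap (fun i => f i ++ (if (i : Int) < ((w + 1 : Nat) : Int) - 1 then ['\n'] else []))
        = (List.range w).flatMap (fun i => f i ++ ['\n']) := by
      simp only [List.flatMap_def]
      refine congrArg List.flatten (List.map_congr_left ?_)
      intro i hi
      have := List.mem_range.mp hi
      rw [if_pos (by push_cast; omega)]
    rw [List.range_succ, List.flatMap_append, List.map_append, h1]
    simp only [List.map_cons, List.map_nil, List.flatMap_cons, List.flatMap_nil, List.append_nil]
    rw [pvJoinSnoc, List.flatMap_map]
    rw [if_neg (by push_cast; omega)]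
    simp

lemma pvPadGet (d : List Char) (w iN : Nat) (hle : d.length ≤ w) (hi : iN < w) :
    (match d[iN]? with | some c => ([c] : List Char) | none => [' ']) =
      [(d ++ List.replicate (w - d.length) ' ').getD iN ' '] := by
  by_cases h : iN < d.length
  · rw [List.getElem?_eq_getElem h,
      List.getD_eq_getElem _ _ (by simp [List.length_append]; omega),
      List.getElem_append_left h]
  · rw [List.getElem?_eq_none (by omega),
      List.getD_eq_getElem _ _ (by simp [List.length_append]; omega),
      List.getElem_append_right (by omega), List.getElem_replicate]

-- A's piece for word j of row i equals B's cell there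
lemma pvCell_eq (ds : List (List Char)) (iN jN : Nat) (hj : jN < ds.length) (hi : iN < pvW ds) :
    pvPieceA ds (iN : Int) (jN : Int) = pvCellAt ds ((jN : Int), ds.getD jN []) iN := by
  have hle : (ds.getD jN []).length ≤ pvW ds := by
    rw [List.getD_eq_getElem _ _ hj]; exact pvLen_le_W ds (List.getElem_mem hj)
  unfold pvPieceA pvCellAt
  dsimp only []
  rw [PySem.List.pyGetD_natCast ds jN [], PySem.List.len_eq ds, PySem.List.len_eq (ds.getD jN []),
    show PySem.List.pyGet? (ds.getD jN []) (iN : Int) = (ds.getD jN [])[iN]? from PySem.List.pyGet?_natCast _ _]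
  simp only [PySem.List.pyGetD_natCast]
  split_ifs <;> try (exfalso; omega)
  all_goals first
    | exact congrArg _ (pvPadGet _ _ _ hle hi)
    | (have hiN : iN < (ds.getD jN []).length := by omega
       rw [List.getElem?_eq_getElem hiN, List.getD_eq_getElem _ _ hiN])
    | (have hiN : (ds.getD jN []).length ≤ iN := by omega
       rw [List.getElem?_eq_none hiN])

-- map over a character list as a map over its index range
lemma pvMapGetD (l : List Char) (f : Char → List Char) :
    l.map f = (List.range l.length).map (fun i => f (l.getD i ' ')) := by
  refine List.ext_getElem (by simp) ?_
  intro i h1 h2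
  simp only [List.getElem_map, List.getElem_range]
  rw [List.getD_eq_getElem _ _ (by simpa using h1)]

-- the zipWith fold distributes over the rows
lemma pvFoldZip {α : Type} (w : Nat) (cells : α → List (List Char)) (cellAt : α → Nat → List Char) :
    ∀ (L : List α) (g : Nat → List (List Char)), (∀ x ∈ L, cells x = (List.range w).map (cellAt x)) →
    L.foldl (fun rows x => List.zipWith (fun r c => r ++ [c]) rows (cells x)) ((List.range w).map g)
      = (List.range w).map (fun i => g i ++ L.map (fun x => cellAt x i)) := by
  intro L
  induction L with
  | nil => intro g _; simp
  | cons x t ih =>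
    intro g h
    simp only [List.foldl_cons, List.map_cons]
    rw [h x (by simp)]
    rw [show List.zipWith (fun r c => r ++ [c]) ((List.range w).map g) ((List.range w).map (cellAt x))
        = (List.range w).map (fun i => g i ++ [cellAt x i]) by
      induction (List.range w) with
      | nil => rfl
      | cons a t ih2 => simp [ih2]]
    rw [ih (fun i => g i ++ [cellAt x i]) (fun y hy => h y (by simp [hy]))]
    refine List.map_congr_left ?_
    intro i _
    simp [List.append_assoc]

lemma pvB_eq (mp : String) (descriptions : List String) :
    show_descriptions_alt mp descriptions =
      String.ofList (mp.toList ++ PySem.Chars.join ['\n']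
        ((List.range (pvW (descriptions.map String.toList))).map
          (fun i => (PySem.List.enumerate (descriptions.map String.toList)).flatMap
            (fun jd => pvCellAt (descriptions.map String.toList) jd i)))) := by
  unfold show_descriptions_alt
  dsimp only []
  refine congrArg String.ofList (congrArg (mp.toList ++ ·) (congrArg (PySem.Chars.join ['\n']) ?_))
  rw [show List.replicate (PySem.List.maxD ((descriptions.map String.toList).map PySem.List.len) (fun x => x) 0).toNat ([] : List (List Char))
      = (List.range (pvW (descriptions.map String.toList))).map (fun _ => []) by
    rw [pvMaxD_eq_W]; simp [List.map_const']]
  rw [pvFoldZip (pvW (descriptions.map String.toList)) _ (pvCellAt (descriptions.map String.toList))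
      (PySem.List.enumerate (descriptions.map String.toList)) (fun _ => []) ?_]
  · simp [List.map_map, List.flatMap_def]
  · intro jd hmem
    obtain ⟨k, hk, rfl⟩ := (PySem.List.mem_enumerate_iff _ _ _).mp hmem
    have hle : ((descriptions.map String.toList)[k]).length ≤ pvW (descriptions.map String.toList) :=
      pvLen_le_W _ (List.getElem_mem hk)
    unfold pvCellAt
    simp only [zero_add]
    rw [pvMaxD_eq_W (descriptions.map String.toList), PySem.List.pyRange_zero_natCast, List.map_map]
    rw [show ((pvW (descriptions.map String.toList) : Int)
        - PySem.List.len ((descriptions.map String.toList)[k])).toNat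
        = pvW (descriptions.map String.toList) - ((descriptions.map String.toList)[k]).length by
      rw [PySem.List.len_eq]; omega]
    rw [pvMapGetD ((descriptions.map String.toList)[k] ++ List.replicate
        (pvW (descriptions.map String.toList) - ((descriptions.map String.toList)[k]).length) ' ')]
    rw [show ((descriptions.map String.toList)[k] ++ List.replicate
        (pvW (descriptions.map String.toList) - ((descriptions.map String.toList)[k]).length) ' ').length
        = pvW (descriptions.map String.toList) by
      rw [List.length_append, List.length_replicate]; omega]
    split_ifs <;> rfl

-- B's per-row flatMap over the enumerated words equals A's row
lemma pvRow_eq (ds : List (List Char)) (iN : Nat) (hi : iN < pvW ds) :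
    pvRowA ds (iN : Int) = (PySem.List.enumerate ds).flatMap (fun jd => pvCellAt ds jd iN) := by
  unfold pvRowA
  rw [PySem.List.enumerate_eq_map_pyRange ds ([] : List Char), List.flatMap_map]
  rw [PySem.List.len_eq, PySem.List.pyRange_zero_natCast, List.flatMap_map, List.flatMap_map]
  simp only [List.flatMap_def]
  refine congrArg List.flatten (List.map_congr_left ?_)
  intro j hj
  have hjlt := List.mem_range.mp hj
  have := pvCell_eq ds iN j hjlt hi
  rw [this]
  rw [show PySem.List.pyGetD ds (j : Int) [] = ds.getD j [] from PySem.List.pyGetD_natCast ds j []]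

lemma pvMain (mp : String) (descriptions : List String) :
    show_descriptions mp descriptions = show_descriptions_alt mp descriptions := by
  rw [pvA_eq, pvB_eq]
  refine congrArg String.ofList (congrArg (mp.toList ++ ·) ?_)
  rw [pvMaxA_eq_W, PySem.List.pyRange_zero_natCast, List.flatMap_map]
  rw [pvJoin_eq (pvW (descriptions.map String.toList)) (fun i => pvRowA (descriptions.map String.toList) (i : Int))]
  refine congrArg (PySem.Chars.join ['\n']) (List.map_congr_left ?_)
  intro i hi
  exact pvRow_eq _ i (List.mem_range.mp hi)

-- ===== VERDICT (by name: the statement is the Claim_ definition above) =====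
theorem show_descriptions_spec : Claim_equal_show_descriptions := by
  intro mp ds _
  unfold Spec_show_descriptions
  exact pvMain mp ds
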